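-- pv_equiv track=rewrite | github.com/bilev-like-me/Welltory | script.py | find_schema
-- ===== SOURCE A (Python) =====
-- def distance(a, b):
--     "Calculates the Levenshtein distance between a and b."
--     n, m = len(a), len(b)
--     if n > m:
--         # Make sure n <= m, to use O(min(n, m)) space
--         a, b = b, a
--         n, m = m, n
--
--     current_row = range(n + 1)  # Keep current and previous row, not entire matrix
--     for i in range(1, m + 1):
--         previous_row, current_row = current_row, [i] + [0] * n
--         for j in range(1, n + 1):
--             add, delete, change = previous_row[j] + 1, current_row[j - 1] + 1, previous_row[j - 1]
--             if a[j - 1] != b[i - 1]: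
--                 change += 1
--             current_row[j] = min(add, delete, change)
--
--     return current_row[n]
--
-- def find_schema(sch_list, evnt):
--     '''
--     Находит схему с максимальным соответствием
--     '''
--     # Сначала избавимся от возможных случайных пробелов, которых точно нет в названии наших схем
--     evnt = evnt.replace(' ', '')
--
--     schema = sch_list[0]
--     difference = distance(schema[:-7], evnt)
--     for sch in sch_list[1:]:
--         d = distance(sch[:-7], evnt)
--         if d < difference:
--             difference = d
--             schema = sch
--     return schema
-- ===== SOURCE B (Python) =====
-- def find_schema(sch_list, evnt):
--     '''
--     Находит схему с максимальным соответствием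
--     '''
--     evnt = evnt.replace(' ', '')
--
--     def dist(a):
--         # Top-down memoized Levenshtein distance between a and evnt.
--         memo = {}
--
--         def rec(i, j):
--             if i == 0:
--                 return j
--             if j == 0:
--                 return i
--             if (i, j) in memo:
--                 return memo[(i, j)]
--             if a[i - 1] == evnt[j - 1]:
--                 res = rec(i - 1, j - 1)
--             else:
--                 res = 1 + min(rec(i - 1, j), rec(i, j - 1), rec(i - 1, j - 1))
--             memo[(i, j)] = res
--             return res
--
--         return rec(len(a), len(evnt))
--
--     # min() keeps the first element on ties, like A's strict-< loop.
--     return min(sch_list, key=lambda sch: dist(sch[:-7]))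
-- ===== Notes on version B (the rewrite author's own statement) =====
-- stated objective: alternative
-- what changed: The bottom-up rolling-two-row Levenshtein sweep (with its swap-shorter-string trick and in-place row updates) is replaced by a top-down memoized recursion rec(i,j) over shrinking index pairs, and the strict-< selection loop is replaced by min(sch_list, key=...), which keeps the first schema on ties just like A.
import Mathlib
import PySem

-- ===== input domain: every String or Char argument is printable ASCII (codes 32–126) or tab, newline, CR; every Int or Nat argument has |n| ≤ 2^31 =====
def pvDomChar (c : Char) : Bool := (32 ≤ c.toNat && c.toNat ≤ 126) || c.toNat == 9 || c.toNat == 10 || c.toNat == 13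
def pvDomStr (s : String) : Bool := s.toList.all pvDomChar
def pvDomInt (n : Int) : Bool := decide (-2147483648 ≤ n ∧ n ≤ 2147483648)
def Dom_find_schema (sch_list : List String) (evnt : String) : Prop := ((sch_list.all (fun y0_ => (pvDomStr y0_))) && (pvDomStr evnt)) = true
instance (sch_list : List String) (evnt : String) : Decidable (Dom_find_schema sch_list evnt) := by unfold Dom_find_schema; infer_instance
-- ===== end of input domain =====

-- B replaces A's bottom-up rolling-two-row Levenshtein sweep by a top-down memoized
-- recursion over index pairs and selects the schema with min(key=...); alternative
-- decomposition of the same cost, proved to return A's exact value.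


-- ===== PORT A =====
-- inner loop body of distance(): current_row[j] = min(add, delete, change) for j = jj+1
def innerStepA (a b : List Char) (prev : List Nat) (i : Nat) (cur : List Nat) (jj : Nat) : List Nat :=
  let add := prev.getD (jj + 1) 0 + 1
  let delete := cur.getD jj 0 + 1
  let change := prev.getD jj 0 + (if a.getD jj ' ' ≠ b.getD i ' ' then 1 else 0)
  cur.set (jj + 1) (min (min add delete) change)

-- one iteration of the outer 'for i in range(1, m+1)' loop (ii = i-1)
def outerStepA (a b : List Char) (prev : List Nat) (ii : Nat) : List Nat :=
  (List.range a.length).foldl (innerStepA a b prev ii) ((ii + 1) :: List.replicate a.length 0)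

-- distance(a, b): swap so n <= m, then the rolling-row sweep
def distanceA (al bl : List Char) : Nat :=
  let a := if al.length > bl.length then bl else al
  let b := if al.length > bl.length then al else bl
  ((List.range b.length).foldl (outerStepA a b) (List.range (a.length + 1))).getD a.length 0

def find_schema (sch_list : List String) (evnt : String) : String :=
  let e := (PySem.Str.replace evnt " " "").toList
  match sch_list with
  | [] => ""  -- Python raises IndexError here; excluded by Pre_find_schema
  | s0 :: rest =>
    (rest.foldl
      (fun st sch =>
        let d := distanceA (PySem.List.slice sch.toList none (some (-7))) e
        if d < st.2 then (sch, d) else st)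
      (s0, distanceA (PySem.List.slice s0.toList none (some (-7))) e)).1

-- ===== PORT B =====
-- rec(i, j) of Source B with its memo dict threaded through; the fuel argument (= i + j
-- at the top call) only makes the recursion structural: with i + j <= fuel the
-- fuel-exhausted branch is never reached
def levMemo (a b : List Char) : Nat → Nat → Nat → PySem.Dict (Nat × Nat) Nat →
    Nat × PySem.Dict (Nat × Nat) Nat
  | fuel, i, j, memo =>
    if i = 0 then (j, memo)
    else if j = 0 then (i, memo)
    else
      match memo.get? (i, j) with
      | some v => (v, memo)
      | none =>
        match fuel with
        | 0 => (0, memo)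
        | f + 1 =>
          let r :=
            if a.getD (i - 1) ' ' = b.getD (j - 1) ' ' then
              levMemo a b f (i - 1) (j - 1) memo
            else
              let x := levMemo a b f (i - 1) j memo
              let y := levMemo a b f i (j - 1) x.2
              let z := levMemo a b f (i - 1) (j - 1) y.2
              (1 + min (min x.1 y.1) z.1, z.2)
          (r.1, r.2.insert (i, j) r.1)

-- dist(a) of Source B: rec(len(a), len(evnt)) with a fresh memo
def distB (a e : List Char) : Nat :=
  (levMemo a e (a.length + e.length) a.length e.length PySem.Dict.empty).1

def find_schema_alt (sch_list : List String) (evnt : String) : String :=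
  let e := (PySem.Str.replace evnt " " "").toList
  -- min() raises ValueError on []; the .getD "" default is only hit there, excluded by Pre_
  (PySem.List.min? sch_list
      (fun sch => distB (PySem.List.slice sch.toList none (some (-7))) e)).getD ""

-- ===== PRECONDITION & SPEC =====
-- A indexes sch_list[0] (IndexError on []) and B calls min on it (ValueError on []):
-- both raise on the empty list, so Pre_ excludes exactly it.
def Pre_find_schema (sch_list : List String) (evnt : String) : Prop := sch_list ≠ []
instance (sch_list : List String) (evnt : String) : Decidable (Pre_find_schema sch_list evnt) := by
  unfold Pre_find_schema; infer_instance

def pvWitness_find_schema : List String × String := (["purchaseschema.json", "loginschema.json"], "log in")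

def Spec_find_schema (sch_list : List String) (evnt : String) (out : String) : Prop := out = find_schema_alt sch_list evnt
instance (sch_list : List String) (evnt : String) (out : String) : Decidable (Spec_find_schema sch_list evnt out) := by unfold Spec_find_schema; infer_instance

-- ===== CLAIM (what is proved, stated in full; the proofs are below) =====
def Claim_equal_find_schema : Prop := ∀ (sch_list : List String) (evnt : String), Dom_find_schema sch_list evnt → Pre_find_schema sch_list evnt → Spec_find_schema sch_list evnt (find_schema sch_list evnt)

-- ===== LEMMAS AND PROOFS =====

-- pure (unmemoized) Levenshtein distance between the length-i prefix of a and the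
-- length-j prefix of b; proof-side reference function for both ports
def Lev (a b : List Char) : Nat → Nat → Nat
  | 0, j => j
  | i + 1, 0 => i + 1
  | i + 1, j + 1 =>
    if a.getD i ' ' = b.getD j ' ' then Lev a b i j
    else 1 + min (min (Lev a b i (j + 1)) (Lev a b (i + 1) j)) (Lev a b i j)
termination_by i j => (i, j)

lemma Lev_zero_left (a b : List Char) (j : Nat) : Lev a b 0 j = j := by
  cases j <;> simp [Lev]

lemma Lev_zero_right (a b : List Char) (i : Nat) : Lev a b i 0 = i := by
  cases i <;> simp [Lev]

-- Lipschitz in each index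
lemma Lev_lip (a b : List Char) : ∀ s i j, i + j ≤ s →
    (Lev a b (i + 1) j ≤ Lev a b i j + 1) ∧ (Lev a b i (j + 1) ≤ Lev a b i j + 1) ∧
    (Lev a b i j ≤ Lev a b (i + 1) j + 1) ∧ (Lev a b i j ≤ Lev a b i (j + 1) + 1) := by
  intro s
  induction s with
  | zero =>
    intro i j h
    have hi : i = 0 := by omega
    have hj : j = 0 := by omega
    subst hi; subst hj
    simp [Lev_zero_left, Lev_zero_right]
  | succ s ih =>
    intro i j h
    refine ⟨?_, ?_, ?_, ?_⟩
    · cases j with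
      | zero => simp [Lev_zero_right]
      | succ j' =>
        have H := ih i j' (by omega)
        simp only [Lev]
        split_ifs with hc <;> omega
    · cases i with
      | zero => simp [Lev_zero_left]
      | succ i' =>
        have H := ih i' j (by omega)
        simp only [Lev]
        split_ifs with hc <;> omega
    · cases j with
      | zero => simp [Lev_zero_right]; omega
      | succ j' =>
        have H := ih i j' (by omega)
        simp only [Lev]
        split_ifs with hc <;> omega
    · cases i with
      | zero => simp [Lev_zero_left]; omega
      | succ i' =>
        have H := ih i' j (by omega)
        simp only [Lev]
        split_ifs with hc <;> omega

-- the bottom-up recurrence A's row update implements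
lemma Lev_succ_succ (a b : List Char) (i j : Nat) :
    Lev a b (i + 1) (j + 1) =
      min (min (Lev a b i (j + 1) + 1) (Lev a b (i + 1) j + 1))
        (Lev a b i j + (if a.getD i ' ' = b.getD j ' ' then 0 else 1)) := by
  have H := Lev_lip a b (i + j) i j (le_refl _)
  by_cases hc : a.getD i ' ' = b.getD j ' '
  · simp only [Lev, if_pos hc]
    omega
  · simp only [Lev, if_neg hc]
    omega

lemma Lev_comm (a b : List Char) : ∀ s i j, i + j ≤ s → Lev a b i j = Lev b a j i := by
  intro s
  induction s with
  | zero =>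
    intro i j h
    have hi : i = 0 := by omega
    have hj : j = 0 := by omega
    subst hi; subst hj; simp [Lev_zero_left]
  | succ s ih =>
    intro i j h
    cases i with
    | zero => simp [Lev_zero_left, Lev_zero_right]
    | succ i' =>
      cases j with
      | zero => simp [Lev_zero_left, Lev_zero_right]
      | succ j' =>
        have h1 := ih i' j' (by omega)
        have h2 := ih i' (j' + 1) (by omega)
        have h3 := ih (i' + 1) j' (by omega)
        by_cases hc : a.getD i' ' ' = b.getD j' ' '
        · simp only [Lev, if_pos hc, if_pos hc.symm]
          exact h1
        · have hc' : ¬ b.getD j' ' ' = a.getD i' ' ' := fun hx => hc hx.symm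
          simp only [Lev, if_neg hc, if_neg hc']
          omega

-- A-side: the partially built current row after t inner iterations
lemma set_append_cons (l1 l2 : List Nat) (t v : Nat) (h : l1.length = t + 1) :
    (l1 ++ 0 :: l2).set (t + 1) v = l1 ++ v :: l2 := by
  rw [← h, show l1.length = l1.length + 0 from rfl, List.set_append_right _ _ (by omega)]
  simp

lemma innerA_partial (a b : List Char) (ii : Nat) :
    ∀ t, t ≤ a.length →
      (List.range t).foldl
          (innerStepA a b ((List.range (a.length + 1)).map (fun j => Lev a b j ii)) ii)
          ((ii + 1) :: List.replicate a.length 0)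
        = ((List.range (t + 1)).map (fun j => Lev a b j (ii + 1)))
            ++ List.replicate (a.length - t) 0 := by
  intro t
  induction t with
  | zero =>
    intro _
    simp [Lev_zero_left]
  | succ t ihh =>
    intro ht
    have ht' : t ≤ a.length := by omega
    rw [show List.range (t + 1) = List.range t ++ [t] from List.range_succ,
      List.foldl_append, ihh ht']
    simp only [List.foldl_cons, List.foldl_nil]
    rw [innerStepA]
    have hlen : ((List.range (t + 1)).map (fun j => Lev a b j (ii + 1))).length = t + 1 := by
      simp
    have hcur : (((List.range (t + 1)).map (fun j => Lev a b j (ii + 1)))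
          ++ List.replicate (a.length - t) 0).getD t 0 = Lev a b t (ii + 1) := by
      rw [List.getD_append _ _ _ _ (by rw [hlen]; omega)]
      exact PySem.List.getD_map_range _ _ _ _ (by omega)
    have hprev1 : ((List.range (a.length + 1)).map (fun j => Lev a b j ii)).getD (t + 1) 0
        = Lev a b (t + 1) ii := PySem.List.getD_map_range _ _ _ _ (by omega)
    have hprev0 : ((List.range (a.length + 1)).map (fun j => Lev a b j ii)).getD t 0
        = Lev a b t ii := PySem.List.getD_map_range _ _ _ _ (by omega)
    have hval : min (min (Lev a b (t + 1) ii + 1) (Lev a b t (ii + 1) + 1))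
        (Lev a b t ii + (if a.getD t ' ' ≠ b.getD ii ' ' then 1 else 0))
        = Lev a b (t + 1) (ii + 1) := by
      have hrec := Lev_succ_succ a b t ii
      by_cases hc : a.getD t ' ' = b.getD ii ' '
      · rw [if_neg (not_not_intro hc)]
        rw [if_pos hc] at hrec
        omega
      · rw [if_pos hc]
        rw [if_neg hc] at hrec
        omega
    rw [hcur, hprev1, hprev0, hval]
    rw [show List.replicate (a.length - t) (0 : Nat)
        = 0 :: List.replicate (a.length - (t + 1)) 0 from by
      rw [show a.length - t = (a.length - (t + 1)) + 1 from by omega, List.replicate_succ]]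
    rw [set_append_cons _ _ _ _ hlen]
    rw [show List.range (t + 1 + 1) = List.range (t + 1) ++ [t + 1] from List.range_succ]
    simp

lemma outerStepA_spec (a b : List Char) (ii : Nat) :
    outerStepA a b ((List.range (a.length + 1)).map (fun j => Lev a b j ii)) ii =
      (List.range (a.length + 1)).map (fun j => Lev a b j (ii + 1)) := by
  rw [outerStepA]
  rw [innerA_partial a b ii a.length (le_refl _)]
  simp

lemma rowsA_spec (a b : List Char) :
    ∀ k, (List.range k).foldl (outerStepA a b) (List.range (a.length + 1))
        = (List.range (a.length + 1)).map (fun j => Lev a b j k) := by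
  intro k
  induction k with
  | zero =>
    simp [Lev_zero_right]
  | succ k ih =>
    rw [show List.range (k + 1) = List.range k ++ [k] from List.range_succ,
      List.foldl_append, ih]
    simp only [List.foldl_cons, List.foldl_nil]
    exact outerStepA_spec a b k

lemma distanceA_eq_Lev (al bl : List Char) :
    distanceA al bl = Lev al bl al.length bl.length := by
  rw [distanceA]
  by_cases h : al.length > bl.length
  · simp only [if_pos h]
    rw [rowsA_spec bl al al.length,
      PySem.List.getD_map_range _ _ _ _ (Nat.lt_succ_self _)]
    exact (Lev_comm al bl (al.length + bl.length) al.length bl.length (le_refl _)).symm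
  · simp only [if_neg h]
    rw [rowsA_spec al bl bl.length,
      PySem.List.getD_map_range _ _ _ _ (Nat.lt_succ_self _)]

-- B-side: the memo only ever stores correct values
def GoodMemo (a b : List Char) (m : PySem.Dict (Nat × Nat) Nat) : Prop :=
  ∀ i j v, m.get? (i, j) = some v → v = Lev a b i j

lemma levMemo_correct (a b : List Char) : ∀ f i j m, i + j ≤ f → GoodMemo a b m →
    (levMemo a b f i j m).1 = Lev a b i j ∧ GoodMemo a b (levMemo a b f i j m).2 := by
  intro f
  induction f with
  | zero =>
    intro i j m hs hg
    have hi : i = 0 := by omega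
    subst hi
    rw [levMemo]
    simp [Lev_zero_left, hg]
  | succ f ih =>
    intro i j m hs hg
    rw [levMemo]
    by_cases hi : i = 0
    · subst hi
      simp only [if_pos rfl]
      exact ⟨(Lev_zero_left a b j).symm, hg⟩
    by_cases hj : j = 0
    · subst hj
      simp only [if_neg hi, if_pos rfl]
      exact ⟨(Lev_zero_right a b i).symm, hg⟩
    simp only [if_neg hi, if_neg hj]
    obtain ⟨i', rfl⟩ : ∃ k, i = k + 1 := ⟨i - 1, by omega⟩
    obtain ⟨j', rfl⟩ : ∃ k, j = k + 1 := ⟨j - 1, by omega⟩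
    rcases hm : m.get? (i' + 1, j' + 1) with _ | v
    · simp only [Nat.add_sub_cancel]
      by_cases hc : a.getD i' ' ' = b.getD j' ' '
      · simp only [if_pos hc]
        obtain ⟨h1, h2⟩ := ih i' j' m (by omega) hg
        have hL : Lev a b (i' + 1) (j' + 1) = Lev a b i' j' := by
          simp only [Lev, if_pos hc]
        have hval : (levMemo a b f i' j' m).1 = Lev a b (i' + 1) (j' + 1) := h1.trans hL.symm
        refine ⟨hval, ?_⟩
        intro ii jj vv hv
        rw [PySem.Dict.get?_insert] at hv
        split_ifs at hv with hk
        · obtain ⟨h3, h4⟩ := Prod.mk.injEq .. ▸ hk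
          cases hv
          subst h3; subst h4
          exact hval
        · exact h2 _ _ _ hv
      · simp only [if_neg hc]
        obtain ⟨hx1, hx2⟩ := ih i' (j' + 1) m (by omega) hg
        obtain ⟨hy1, hy2⟩ := ih (i' + 1) j' _ (by omega) hx2
        obtain ⟨hz1, hz2⟩ := ih i' j' _ (by omega) hy2
        have hval : 1 + min (min (levMemo a b f i' (j' + 1) m).1
              (levMemo a b f (i' + 1) j' (levMemo a b f i' (j' + 1) m).2).1)
              (levMemo a b f i' j'
                (levMemo a b f (i' + 1) j' (levMemo a b f i' (j' + 1) m).2).2).1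
            = Lev a b (i' + 1) (j' + 1) := by
          rw [hx1, hy1, hz1]
          simp only [Lev, if_neg hc]
        refine ⟨hval, ?_⟩
        intro ii jj vv hv
        rw [PySem.Dict.get?_insert] at hv
        split_ifs at hv with hk
        · obtain ⟨h3, h4⟩ := Prod.mk.injEq .. ▸ hk
          cases hv
          subst h3; subst h4
          exact hval
        · exact hz2 _ _ _ hv
    · exact ⟨hg _ _ _ hm, hg⟩

lemma distB_eq_Lev (a e : List Char) : distB a e = Lev a e a.length e.length := by
  rw [distB]
  exact (levMemo_correct a e (a.length + e.length) a.length e.length PySem.Dict.empty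
    (le_refl _) (by intro i j v hv; simp [PySem.Dict.get?_empty] at hv)).1

lemma dist_eq (al bl : List Char) : distanceA al bl = distB al bl := by
  rw [distanceA_eq_Lev, distB_eq_Lev]

-- the selection loops agree: min? with a key is A's strict-< first-wins fold
lemma min?_cons_eq_fold (key : String → Nat) :
    ∀ (rest : List String) (m : String),
    PySem.List.min? (m :: rest) key
      = some ((rest.foldl (fun st sch => if key sch < st.2 then (sch, key sch) else st)
          (m, key m)).1) := by
  intro rest
  induction rest with
  | nil => intro m; rfl
  | cons x xs ih =>
    intro m
    have h1 : PySem.List.min? (m :: x :: xs) key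
        = PySem.List.min? ((if key x < key m then x else m) :: xs) key := by
      simp only [PySem.List.min?, List.foldl_cons]
      by_cases hx : key x < key m <;> simp [hx]
    rw [h1]
    by_cases hx : key x < key m
    · rw [if_pos hx, ih x]
      simp [List.foldl_cons, hx]
    · rw [if_neg hx, ih m]
      simp [List.foldl_cons, hx]

-- ===== VERDICT (by name: the statement is the Claim_ definition above) =====
theorem find_schema_spec : Claim_equal_find_schema := by
  intro sch_list evnt _ hpre
  unfold Spec_find_schema
  cases sch_list with
  | nil => exact absurd rfl hpre
  | cons s0 rest =>
    rw [find_schema, find_schema_alt]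
    rw [min?_cons_eq_fold (fun sch => distB (PySem.List.slice sch.toList none (some (-7)))
      (PySem.Str.replace evnt " " "").toList) rest s0]
    simp only [Option.getD_some, dist_eq]
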